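-- pv_equiv track=rewrite | github.com/981377660LMT/algorithm-study | tmp/20221009/3.py | robotWithString
-- ===== SOURCE A (Python) =====
-- from collections import defaultdict, Counter
--
-- def robotWithString(s: str) -> str:
--     stack, remain, res = [], Counter(s), []
--     min_ = ord("a")
--     for char in s:
--         stack.append(char)
--         remain[char] -= 1
--         while min_ < ord("z") and remain[chr(min_)] == 0:
--             min_ += 1
--         while stack and ord(stack[-1]) <= min_:
--             res.append(stack.pop())
--     return "".join(res)
-- ===== SOURCE B (Python) =====
-- def robotWithString(s: str) -> str:
--     # suffix-minimum table over the letters 'a'..'y' (the only characters the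
--     # Counter scan in the threshold loop can stop on), sentinel ord('z')
--     n = len(s)
--     suffix_min = [122] * (n + 1)
--     for i in range(n - 1, -1, -1):
--         o = ord(s[i])
--         suffix_min[i] = min(o, suffix_min[i + 1]) if 97 <= o < 122 else suffix_min[i + 1]
--     stack, res = [], []
--     for i, ch in enumerate(s):
--         stack.append(ch)
--         while stack and ord(stack[-1]) <= suffix_min[i + 1]:
--             res.append(stack.pop())
--     return "".join(res)
-- ===== Notes on version B (the rewrite author's own statement) =====
-- stated objective: alternative
-- what changed: Replaces A's decremented Counter dict plus monotone min_ pointer by a precomputed suffix-minimum table (one backward pass) followed by a single forward stack pass comparing against suffix_min[i+1].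
import Mathlib
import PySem

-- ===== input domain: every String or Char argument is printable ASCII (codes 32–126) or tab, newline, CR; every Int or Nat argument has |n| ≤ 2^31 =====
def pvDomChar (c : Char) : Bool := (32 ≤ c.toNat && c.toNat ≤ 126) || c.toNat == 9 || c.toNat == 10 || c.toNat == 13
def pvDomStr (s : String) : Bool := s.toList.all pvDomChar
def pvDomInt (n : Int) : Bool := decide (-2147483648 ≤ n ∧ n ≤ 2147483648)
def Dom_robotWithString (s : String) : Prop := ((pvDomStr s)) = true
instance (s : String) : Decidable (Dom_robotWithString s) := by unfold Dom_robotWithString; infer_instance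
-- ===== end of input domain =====

-- B replaces A's decremented Counter + monotone min_ pointer by a precomputed
-- suffix-minimum table (backward pass) followed by one forward stack pass.

-- ===== PORT A =====
-- 'while min_ < ord("z") and remain[chr(min_)] == 0: min_ += 1'
def pvAdvanceMin (remain : PySem.Dict Char Int) (m : Nat) : Nat :=
  if m < 122 ∧ remain.getD (Char.ofNat m) 0 = 0 then pvAdvanceMin remain (m + 1) else m
termination_by 122 - m

-- 'while stack and ord(stack[-1]) <= min_: res.append(stack.pop())' (stack head = top)
def pvPopA (m : Nat) : List Char → List Char → List Char × List Char
  | [], res => ([], res)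
  | c :: st, res => if c.toNat ≤ m then pvPopA m st (res ++ [c]) else (c :: st, res)

def pvLoopA : List Char → List Char → PySem.Dict Char Int → Nat → List Char → List Char
  | [], _, _, _, res => res
  | c :: cs, stack, remain, m, res =>
    let remain' := remain.modify c 0 (· - 1)
    let m' := pvAdvanceMin remain' m
    let p := pvPopA m' (c :: stack) res
    pvLoopA cs p.1 remain' m' p.2

def robotWithString (s : String) : String :=
  String.ofList (pvLoopA s.toList [] (PySem.Dict.counter s.toList) 97 [])

-- ===== PORT B =====
-- suffix_min table: suffix_min[i] = min ord of the 'a'..'y' characters of s[i:], sentinel 122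
def pvSufTable : List Char → List Nat
  | [] => [122]
  | c :: cs =>
    let t := pvSufTable cs
    let h := t.headD 122
    (if 97 ≤ c.toNat ∧ c.toNat < 122 then min c.toNat h else h) :: t

def pvPopB (m : Nat) : List Char → List Char → List Char × List Char
  | [], res => ([], res)
  | c :: st, res => if c.toNat ≤ m then pvPopB m st (res ++ [c]) else (c :: st, res)

-- forward pass; t is the suffix_min table for the remaining characters, so
-- t.tail.headD 122 = suffix_min[i+1]
def pvLoopB : List Char → List Nat → List Char → List Char → List Char
  | [], _, _, res => res
  | c :: cs, t, stack, res =>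
    let m := t.tail.headD 122
    let p := pvPopB m (c :: stack) res
    pvLoopB cs t.tail p.1 p.2

def robotWithString_alt (s : String) : String :=
  String.ofList (pvLoopB s.toList (pvSufTable s.toList) [] [])

-- ===== PRECONDITION & SPEC =====
def Spec_robotWithString (s : String) (out : String) : Prop := out = robotWithString_alt s
instance (s : String) (out : String) : Decidable (Spec_robotWithString s out) := by unfold Spec_robotWithString; infer_instance

-- ===== CLAIM (what is proved, stated in full; the proofs are below) =====
def Claim_equal_robotWithString : Prop := ∀ (s : String), Dom_robotWithString s → Spec_robotWithString s (robotWithString s)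

-- ===== LEMMAS AND PROOFS =====

-- threshold of a suffix: head of its suffix-min table
def pvH (cs : List Char) : Nat := (pvSufTable cs).headD 122

lemma pvH_bounds (cs : List Char) : 97 ≤ pvH cs ∧ pvH cs ≤ 122 := by
  induction cs with
  | nil => simp [pvH, pvSufTable]
  | cons c cs ih =>
    simp only [pvH, pvSufTable, List.headD_cons] at *
    split
    · omega
    · exact ih

lemma pvH_cons_le (c : Char) (cs : List Char) : pvH (c :: cs) ≤ pvH cs := by
  simp only [pvH, pvSufTable, List.headD_cons]
  split <;> omega

lemma pvH_le_of_mem {c : Char} {cs : List Char} (hm : c ∈ cs)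
    (h1 : 97 ≤ c.toNat) (h2 : c.toNat < 122) : pvH cs ≤ c.toNat := by
  induction cs with
  | nil => simp at hm
  | cons d cs ih =>
    rcases List.mem_cons.mp hm with h | h
    · subst h
      simp only [pvH, pvSufTable, List.headD_cons]
      rw [if_pos ⟨h1, h2⟩]
      omega
    · calc pvH (d :: cs) ≤ pvH cs := pvH_cons_le d cs
        _ ≤ c.toNat := ih h
lemma pvH_attained (cs : List Char) : pvH cs = 122 ∨ ∃ c ∈ cs, c.toNat = pvH cs := by
  induction cs with
  | nil => left; simp [pvH, pvSufTable]
  | cons c cs ih =>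
    simp only [pvH, pvSufTable, List.headD_cons] at ih ⊢
    split
    · rename_i hc
      rcases Nat.le_total c.toNat ((pvSufTable cs).headD 122) with h | h
      · right; exact ⟨c, List.mem_cons_self, by omega⟩
      · rcases ih with h122 | ⟨d, hd, hdt⟩
        · omega
        · right; exact ⟨d, List.mem_cons_of_mem _ hd, by omega⟩
    · rcases ih with h122 | ⟨d, hd, hdt⟩
      · left; exact h122
      · right; exact ⟨d, List.mem_cons_of_mem _ hd, hdt⟩

lemma char_toNat_ofNat {m : Nat} (h : m < 122) : (Char.ofNat m).toNat = m := by
  have hv : Nat.isValidChar m := Or.inl (by omega)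
  simp [Char.ofNat, hv, Char.toNat, Char.ofNatAux]

lemma pvAdvanceMin_eq (cs : List Char) (remain : PySem.Dict Char Int)
    (hcnt : ∀ ch, remain.getD ch 0 = (cs.count ch : Int)) :
    ∀ (k m : Nat), 122 - m ≤ k → 97 ≤ m → m ≤ pvH cs → pvAdvanceMin remain m = pvH cs := by
  intro k
  induction k with
  | zero =>
    intro m hk h97 hle
    have hb := (pvH_bounds cs).2
    have hm : m = 122 := by omega
    subst hm
    rw [pvAdvanceMin, if_neg (fun h => by omega)]
    omega
  | succ k ih =>
    intro m hk h97 hle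
    rw [pvAdvanceMin]
    split
    · rename_i hcond
      obtain ⟨hm122, hz⟩ := hcond
      rw [hcnt (Char.ofNat m)] at hz
      have hz' : cs.count (Char.ofNat m) = 0 := by exact_mod_cast hz
      have hne : m ≠ pvH cs := by
        intro heq
        rcases pvH_attained cs with h122 | ⟨d, hd, hdt⟩
        · omega
        · have hdm : d = Char.ofNat m := by
            have : d.toNat = m := by omega
            rw [← this, Char.ofNat_toNat]
          rw [hdm] at hd
          have := List.count_pos_iff.mpr hd
          omega
      exact ih (m + 1) (by omega) (by omega) (by omega)
    · rename_i hcond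
      rw [Decidable.not_and_iff_not_or_not] at hcond
      rcases hcond with h122 | hz
      · have hb := (pvH_bounds cs).2
        omega
      · by_cases hm122 : m < 122
        · have hz' : cs.count (Char.ofNat m) ≠ 0 := by
            intro h0
            apply hz
            rw [hcnt (Char.ofNat m), h0]
            rfl
          have hmem : Char.ofNat m ∈ cs := List.count_pos_iff.mp (by omega)
          have ht : (Char.ofNat m).toNat = m := char_toNat_ofNat hm122
          have := pvH_le_of_mem hmem (by omega) (by omega)
          omega
        · have hb := (pvH_bounds cs).2
          omega

lemma pvPop_eq (m : Nat) : ∀ (st res : List Char), pvPopA m st res = pvPopB m st res := by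
  intro st
  induction st with
  | nil => intro res; simp [pvPopA, pvPopB]
  | cons c st ih =>
    intro res
    simp only [pvPopA, pvPopB]
    split <;> simp [ih]

lemma pvLoop_eq : ∀ (cs stack : List Char) (remain : PySem.Dict Char Int) (m : Nat) (res : List Char),
    (∀ ch, remain.getD ch 0 = (cs.count ch : Int)) → 97 ≤ m → m ≤ pvH cs →
    pvLoopA cs stack remain m res = pvLoopB cs (pvSufTable cs) stack res := by
  intro cs
  induction cs with
  | nil => intro stack remain m res _ _ _; simp [pvLoopA, pvLoopB]
  | cons c cs ih =>
    intro stack remain m res hcnt h97 hle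
    have hcnt' : ∀ ch, (remain.modify c 0 (· - 1)).getD ch 0 = (cs.count ch : Int) := by
      intro ch
      rw [PySem.Dict.getD_modify]
      have := hcnt ch
      by_cases h : ch = c
      · subst h
        simp only [this, List.count_cons_self]
        push_cast; ring
      · simp only [if_neg h, this, List.count_cons_of_ne (by exact fun he => h he.symm)]
    have hadv : pvAdvanceMin (remain.modify c 0 (· - 1)) m = pvH cs :=
      pvAdvanceMin_eq cs _ hcnt' 122 m (by omega) h97 (le_trans hle (pvH_cons_le c cs))
    show pvLoopA (c :: cs) stack remain m res = pvLoopB (c :: cs) (pvSufTable (c :: cs)) stack res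
    simp only [pvLoopA, pvLoopB, pvSufTable, List.tail_cons]
    rw [hadv, pvPop_eq]
    exact ih _ _ _ _ hcnt' (pvH_bounds cs).1 (le_refl _)

-- ===== VERDICT (by name: the statement is the Claim_ definition above) =====
theorem robotWithString_spec : Claim_equal_robotWithString := by
  intro s _
  show robotWithString s = robotWithString_alt s
  unfold robotWithString robotWithString_alt
  congr 1
  exact pvLoop_eq s.toList [] _ 97 []
    (fun ch => PySem.Dict.getD_counter s.toList ch) (le_refl _) (pvH_bounds s.toList).1
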